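-- pv_equiv track=rewrite | github.com/fangyuan-ksgk/AnnoAttribute | src/dataset.py | remove_duplicate_in_hash_dict
-- ===== SOURCE A (Python) =====
-- def remove_duplicate_in_hash_dict(hash_dict, storage_ids):
--     # List to keep track of hash_ids to be removed
--     hash_ids_to_remove = []
--
--     # Check HashID against duplications
--     for hash_id in hash_dict:
--         if hash_id in storage_ids:
--             # Add hash_id to the list for removal
--             hash_ids_to_remove.append(hash_id)
--
--     # Remove the identified hash_ids from hash_dict
--     for hash_id in hash_ids_to_remove:
--         hash_dict.pop(hash_id)
--     return hash_dict
-- ===== SOURCE B (Python) =====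
-- def remove_duplicate_in_hash_dict(hash_dict, storage_ids):
--     # Build the surviving items in one pass, then replace hash_dict's
--     # contents in place (same object identity, same surviving-key order).
--     filtered = {k: v for k, v in hash_dict.items() if k not in storage_ids}
--     hash_dict.clear()
--     hash_dict.update(filtered)
--     return hash_dict
-- ===== Notes on version B (the rewrite author's own statement) =====
-- stated objective: simpler
-- what changed: Replaces A's two-phase collect-keys-then-pop-each loop pair with a single dict comprehension keeping survivors, followed by clear()+update() so the same dict object is mutated in place.
import Mathlib
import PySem

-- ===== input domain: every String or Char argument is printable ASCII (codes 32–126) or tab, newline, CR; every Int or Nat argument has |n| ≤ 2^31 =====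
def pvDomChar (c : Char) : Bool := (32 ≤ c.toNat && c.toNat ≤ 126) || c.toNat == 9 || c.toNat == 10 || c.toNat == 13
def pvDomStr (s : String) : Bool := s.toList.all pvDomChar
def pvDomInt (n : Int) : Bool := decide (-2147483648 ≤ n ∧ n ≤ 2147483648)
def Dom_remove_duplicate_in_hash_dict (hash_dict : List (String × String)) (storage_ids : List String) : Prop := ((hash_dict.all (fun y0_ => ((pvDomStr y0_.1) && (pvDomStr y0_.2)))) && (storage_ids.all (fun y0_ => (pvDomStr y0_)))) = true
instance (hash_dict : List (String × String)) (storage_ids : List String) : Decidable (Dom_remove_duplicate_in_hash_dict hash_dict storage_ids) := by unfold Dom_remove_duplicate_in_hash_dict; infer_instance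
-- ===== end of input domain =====

-- B replaces A's collect-removal-keys-then-pop two-phase loops with a single
-- filter pass keeping the survivors (objective: simpler). A mutates hash_dict in
-- place; B performs the same in-place replacement, and the equivalence proved
-- here is about the returned value.


-- ===== PORT A =====
-- pop on the association list: drop the first pair with the given key
-- (exact for a Python dict, whose keys are unique — guaranteed by Pre_ below;
-- pop's KeyError is unreachable since every collected key occurs in hash_dict)
def popKey (l : List (String × String)) (k : String) : List (String × String) :=
  l.eraseP (fun p => p.1 == k)

def remove_duplicate_in_hash_dict (hash_dict : List (String × String)) (storage_ids : List String) : List (String × String) :=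
  let hash_ids_to_remove :=
    hash_dict.foldl (fun acc p => if storage_ids.contains p.1 then acc ++ [p.1] else acc) ([] : List String)
  hash_ids_to_remove.foldl popKey hash_dict

-- ===== PORT B =====
def remove_duplicate_in_hash_dict_alt (hash_dict : List (String × String)) (storage_ids : List String) : List (String × String) :=
  hash_dict.filter (fun p => !(storage_ids.contains p.1))

-- ===== PRECONDITION & SPEC =====
-- Pre_ excludes association lists with duplicate keys: a Python dict cannot hold
-- them (they collapse before the call), so A's behaviour there is not defined by A's code.
def Pre_remove_duplicate_in_hash_dict (hash_dict : List (String × String)) (storage_ids : List String) : Prop :=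
  (hash_dict.map Prod.fst).Nodup

instance (hash_dict : List (String × String)) (storage_ids : List String) : Decidable (Pre_remove_duplicate_in_hash_dict hash_dict storage_ids) := by unfold Pre_remove_duplicate_in_hash_dict; infer_instance

def pvWitness_remove_duplicate_in_hash_dict : (List (String × String)) × List String :=
  ([("a", "1"), ("b", "2"), ("c", "3")], ["b", "z"])

def Spec_remove_duplicate_in_hash_dict (hash_dict : List (String × String)) (storage_ids : List String) (out : List (String × String)) : Prop := out = remove_duplicate_in_hash_dict_alt hash_dict storage_ids
instance (hash_dict : List (String × String)) (storage_ids : List String) (out : List (String × String)) : Decidable (Spec_remove_duplicate_in_hash_dict hash_dict storage_ids out) := by unfold Spec_remove_duplicate_in_hash_dict; infer_instance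

-- ===== CLAIM (what is proved, stated in full; the proofs are below) =====
def Claim_equal_remove_duplicate_in_hash_dict : Prop := ∀ (hash_dict : List (String × String)) (storage_ids : List String), Dom_remove_duplicate_in_hash_dict hash_dict storage_ids → Pre_remove_duplicate_in_hash_dict hash_dict storage_ids → Spec_remove_duplicate_in_hash_dict hash_dict storage_ids (remove_duplicate_in_hash_dict hash_dict storage_ids)

-- ===== LEMMAS AND PROOFS =====

theorem foldl_collect_keys (c : String → Bool) (l : List (String × String)) (acc : List String) :
    l.foldl (fun acc p => if c p.1 then acc ++ [p.1] else acc) acc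
      = acc ++ (l.map Prod.fst).filter c := by
  induction l generalizing acc with
  | nil => simp
  | cons p t ih =>
      by_cases h : c p.1 <;> simp [List.foldl_cons, h, ih]

theorem foldl_popKey_cons_of_not_mem (p : String × String) (t : List (String × String))
    (ks : List String) (h : p.1 ∉ ks) :
    ks.foldl popKey (p :: t) = p :: ks.foldl popKey t := by
  induction ks generalizing t with
  | nil => rfl
  | cons k ks ih =>
      simp only [List.mem_cons, not_or] at h
      simp only [List.foldl_cons, popKey, List.eraseP_cons,
        show (p.1 == k) = false by simpa using h.1]
      exact ih _ h.2

theorem foldl_popKey_filter (sids : List String) (l : List (String × String))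
    (hnd : (l.map Prod.fst).Nodup) :
    ((l.map Prod.fst).filter (fun k => sids.contains k)).foldl popKey l
      = l.filter (fun p => !(sids.contains p.1)) := by
  induction l with
  | nil => rfl
  | cons p t ih =>
      simp only [List.map_cons, List.nodup_cons] at hnd
      by_cases h : sids.contains p.1
      · have hpop : popKey (p :: t) p.1 = t := by
          simp [popKey]
        simp only [List.map_cons, List.filter_cons, h, if_true, List.foldl_cons, hpop]
        rw [ih hnd.2]
        simp
      · have hne : p.1 ∉ (t.map Prod.fst).filter (fun k => sids.contains k) := by
          intro hmem; exact hnd.1 (List.mem_of_mem_filter hmem)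
        simp only [List.map_cons, List.filter_cons, h, Bool.false_eq_true, if_false]
        rw [foldl_popKey_cons_of_not_mem p t _ hne, ih hnd.2]
        simp

-- ===== VERDICT (by name: the statement is the Claim_ definition above) =====
theorem remove_duplicate_in_hash_dict_spec : Claim_equal_remove_duplicate_in_hash_dict := by
  intro hash_dict storage_ids _ hpre
  show remove_duplicate_in_hash_dict hash_dict storage_ids
      = remove_duplicate_in_hash_dict_alt hash_dict storage_ids
  unfold remove_duplicate_in_hash_dict remove_duplicate_in_hash_dict_alt
  rw [foldl_collect_keys, List.nil_append]
  exact foldl_popKey_filter storage_ids hash_dict hpre
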